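-- pv_equiv track=rewrite | github.com/martin-eom/ssptools | ssptools/eigenvalues.py | seperateBands
-- ===== SOURCE A (Python) =====
-- def seperateBands(kpoint):
--     v_bands, c_bands = [], []
--     for ev in kpoint:
--         if ev[1] == 0:
--             c_bands.append(ev[0])
--         else:
--             v_bands.append(ev[0])
--     c_bands.sort()
--     v_bands.sort(reverse = True)
--     return c_bands, v_bands
-- ===== SOURCE B (Python) =====
-- def seperateBands(kpoint):
--     s = sorted(kpoint, key=lambda e: e[0])
--     c_bands, v_bands = [], []
--     for ev in s:
--         if ev[1] == 0:
--             c_bands.append(ev[0])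
--         else:
--             v_bands.append(ev[0])
--     return c_bands, v_bands[::-1]
-- ===== Notes on version B (the rewrite author's own statement) =====
-- stated objective: alternative
-- what changed: B sorts the whole kpoint list once by eigenvalue and then partitions it in a single pass (reversing the valence list at the end), instead of A's partition-first-then-two-sorts order of operations.
import Mathlib
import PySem

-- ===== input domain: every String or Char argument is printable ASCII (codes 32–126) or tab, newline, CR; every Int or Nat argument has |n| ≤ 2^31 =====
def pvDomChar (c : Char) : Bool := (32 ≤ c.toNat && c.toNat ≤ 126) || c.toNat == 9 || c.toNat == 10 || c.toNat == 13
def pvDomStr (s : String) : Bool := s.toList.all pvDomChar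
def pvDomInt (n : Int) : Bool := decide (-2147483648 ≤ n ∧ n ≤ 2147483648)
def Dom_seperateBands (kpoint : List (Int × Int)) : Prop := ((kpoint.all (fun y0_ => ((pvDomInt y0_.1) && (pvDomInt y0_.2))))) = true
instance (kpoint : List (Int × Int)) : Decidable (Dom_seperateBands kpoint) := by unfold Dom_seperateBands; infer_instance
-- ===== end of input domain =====

-- B sorts the whole list once by eigenvalue, then partitions it in one pass (reversing
-- the valence list at the end), instead of A's partition-first-then-two-sorts.

-- ===== PORT A =====
-- partition loop: state (v_bands, c_bands), appends at the back, then two sorts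
def seperateBands (kpoint : List (Int × Int)) : List Int × List Int :=
  let vc := kpoint.foldl
    (fun (acc : List Int × List Int) ev =>
      if ev.2 = 0 then (acc.1, acc.2 ++ [ev.1]) else (acc.1 ++ [ev.1], acc.2))
    ([], [])
  (PySem.List.sorted vc.2 (fun x => x) false, PySem.List.sorted vc.1 (fun x => x) true)

-- ===== PORT B =====
-- one sort of the pairs by first component, then a single partition pass, v reversed
def seperateBands_alt (kpoint : List (Int × Int)) : List Int × List Int :=
  let s := PySem.List.sorted kpoint (fun e => e.1) false
  let cv := s.foldl
    (fun (acc : List Int × List Int) ev =>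
      if ev.2 = 0 then (acc.1 ++ [ev.1], acc.2) else (acc.1, acc.2 ++ [ev.1]))
    ([], [])
  (cv.1, cv.2.reverse)

-- ===== PRECONDITION & SPEC =====
def Spec_seperateBands (kpoint : List (Int × Int)) (out : List Int × List Int) : Prop := out = seperateBands_alt kpoint
instance (kpoint : List (Int × Int)) (out : List Int × List Int) : Decidable (Spec_seperateBands kpoint out) := by unfold Spec_seperateBands; infer_instance

-- ===== CLAIM (what is proved, stated in full; the proofs are below) =====
def Claim_equal_seperateBands : Prop := ∀ (kpoint : List (Int × Int)), Dom_seperateBands kpoint → Spec_seperateBands kpoint (seperateBands kpoint)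

-- ===== LEMMAS AND PROOFS =====

-- A's partition fold, characterised by filter/map
theorem foldA_eq (l : List (Int × Int)) (v c : List Int) :
    l.foldl
      (fun (acc : List Int × List Int) ev =>
        if ev.2 = 0 then (acc.1, acc.2 ++ [ev.1]) else (acc.1 ++ [ev.1], acc.2))
      (v, c)
    = (v ++ (l.filter (fun e => !decide (e.2 = 0))).map Prod.fst,
       c ++ (l.filter (fun e => decide (e.2 = 0))).map Prod.fst) := by
  induction l generalizing v c with
  | nil => simp
  | cons h t ih =>
    by_cases hz : h.2 = 0 <;> simp [hz, ih]

-- B's partition fold, characterised by filter/map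
theorem foldB_eq (l : List (Int × Int)) (c v : List Int) :
    l.foldl
      (fun (acc : List Int × List Int) ev =>
        if ev.2 = 0 then (acc.1 ++ [ev.1], acc.2) else (acc.1, acc.2 ++ [ev.1]))
      (c, v)
    = (c ++ (l.filter (fun e => decide (e.2 = 0))).map Prod.fst,
       v ++ (l.filter (fun e => !decide (e.2 = 0))).map Prod.fst) := by
  induction l generalizing c v with
  | nil => simp
  | cons h t ih =>
    by_cases hz : h.2 = 0 <;> simp [hz, ih]

-- a filtered slice of the key-sorted list is a weakly increasing permutation of the filtered input
theorem filt_perm (p : Int × Int → Bool) (kpoint : List (Int × Int)) :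
    (((PySem.List.sorted kpoint (fun e => e.1) false).filter p).map Prod.fst).Perm
      ((kpoint.filter p).map Prod.fst) :=
  ((PySem.List.sorted_perm kpoint (fun e => e.1) false).filter p).map Prod.fst

theorem filt_pairwise (p : Int × Int → Bool) (kpoint : List (Int × Int)) :
    (((PySem.List.sorted kpoint (fun e => e.1) false).filter p).map Prod.fst).Pairwise (· ≤ ·) := by
  rw [List.pairwise_map]
  exact ((PySem.List.sorted_pairwise kpoint (fun e => e.1)).sublist List.filter_sublist)

-- ascending half: sorting the filtered values = filtering the sorted pairs
theorem c_eq (kpoint : List (Int × Int)) :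
    PySem.List.sorted ((kpoint.filter (fun e => decide (e.2 = 0))).map Prod.fst) (fun x => x) false
      = ((PySem.List.sorted kpoint (fun e => e.1) false).filter (fun e => decide (e.2 = 0))).map Prod.fst :=
  PySem.List.sorted_id_eq_of_perm_of_pairwise _ _
    (filt_perm _ kpoint) (filt_pairwise _ kpoint)

-- descending half: sort(reverse=True) = reverse of the ascending filtered slice
theorem v_eq (kpoint : List (Int × Int)) :
    PySem.List.sorted ((kpoint.filter (fun e => !decide (e.2 = 0))).map Prod.fst) (fun x => x) true
      = (((PySem.List.sorted kpoint (fun e => e.1) false).filter (fun e => !decide (e.2 = 0))).map Prod.fst).reverse := by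
  apply List.Perm.eq_of_pairwise (le := fun a b : Int => b ≤ a)
  · intro a b _ _ h1 h2; omega
  · exact PySem.List.sorted_pairwise_rev
      ((kpoint.filter (fun e => !decide (e.2 = 0))).map Prod.fst) (fun x => x)
  · simpa [List.pairwise_reverse] using filt_pairwise (fun e => !decide (e.2 = 0)) kpoint
  · exact (PySem.List.sorted_perm _ _ _).trans
      ((filt_perm _ kpoint).symm.trans (List.reverse_perm _).symm)

-- ===== VERDICT (by name: the statement is the Claim_ definition above) =====
theorem seperateBands_spec : Claim_equal_seperateBands := by
  intro kpoint _
  unfold Spec_seperateBands seperateBands seperateBands_alt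
  simp only [foldA_eq, foldB_eq, List.nil_append]
  exact Prod.ext (c_eq kpoint) (v_eq kpoint)
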